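-- pv_equiv track=rewrite | github.com/gregoryann/Python-Beginner-Examples | +1500 Python Challenges/Medium/Digital Decipher.py | digital_decipher
-- ===== SOURCE A (Python) =====
-- def digital_decipher(eMessage, key):
-- 	Alphabet = ['a', 'b', 'c', 'd', 'e', 'f',
-- 						  'g', 'h', 'i', 'j', 'k', 'l',
-- 						  'm', 'n', 'o', 'p', 'q', 'r',
-- 						  's', 't', 'u', 'v', 'w', 'x',
-- 						  'y', 'z']
-- 	a = ""
-- 	x = int(len(eMessage)/len(str(key)))
-- 	y = len(eMessage)%len(str(key))
-- 	key = x * str(key) + str(key)[0:y]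
-- 	for i in range(0, len(eMessage)):
-- 		a = a + Alphabet[eMessage[i] - 1 - int(key[i])]
--
-- 	return a
-- ===== SOURCE B (Python) =====
-- def digital_decipher(eMessage, key):
-- 	letters = 'abcdefghijklmnopqrstuvwxyz'
-- 	k = str(key)
-- 	out = []
-- 	rest = eMessage
-- 	while rest:
-- 		out.append(''.join(letters[c - 1 - int(d)] for c, d in zip(rest, k)))
-- 		rest = rest[len(k):]
-- 	return ''.join(out)
-- ===== Notes on version B (the rewrite author's own statement) =====
-- stated objective: alternative
-- what changed: B replaces A's full-length repeated-key buffer and per-index loop by a block decomposition: it repeatedly zips the remaining message with the key string itself (zip truncates the last block), decoding one key-sized block per iteration with no index arithmetic and no materialised repeated key.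
import Mathlib
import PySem

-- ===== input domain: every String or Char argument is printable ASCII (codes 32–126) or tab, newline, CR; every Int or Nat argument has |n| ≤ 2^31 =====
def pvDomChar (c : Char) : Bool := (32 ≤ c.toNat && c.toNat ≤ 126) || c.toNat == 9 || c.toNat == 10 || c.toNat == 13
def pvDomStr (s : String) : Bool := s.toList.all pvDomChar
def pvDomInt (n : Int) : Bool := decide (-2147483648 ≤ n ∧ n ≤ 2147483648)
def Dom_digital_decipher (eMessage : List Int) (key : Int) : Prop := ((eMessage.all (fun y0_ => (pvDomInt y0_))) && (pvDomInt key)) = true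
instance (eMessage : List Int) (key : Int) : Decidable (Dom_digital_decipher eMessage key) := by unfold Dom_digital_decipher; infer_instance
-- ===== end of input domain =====

-- B replaces A's materialised repeated-key buffer and per-index loop with a block decomposition that zips key-sized chunks of the message with the key string (alternative, similar cost).


-- ===== PORT A =====
def pvAlphabet : List Char :=
  ['a', 'b', 'c', 'd', 'e', 'f', 'g', 'h', 'i', 'j', 'k', 'l', 'm',
   'n', 'o', 'p', 'q', 'r', 's', 't', 'u', 'v', 'w', 'x', 'y', 'z']

-- literal port of A: build x*str(key) + str(key)[0:y]; loop i over range(len(eMessage)),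
-- appending Alphabet[eMessage[i] - 1 - int(key[i])].  pyGet?/ofChars? are none exactly where
-- Python raises (IndexError/ValueError); Pre_ excludes those inputs, .getD is never reached on Pre_.
def digital_decipher (eMessage : List Int) (key : Int) : String :=
  let ks := PySem.Int.toChars key
  let x := PySem.Int.truncdiv (eMessage.length : Int) (ks.length : Int)
  let y := PySem.Int.mod (eMessage.length : Int) (ks.length : Int)
  let key' := (List.replicate x.toNat ks).flatten ++ PySem.List.slice ks (some 0) (some y)
  let a := (PySem.List.pyRange 0 (eMessage.length : Int) 1).foldl
    (fun a i =>
      a ++ [(PySem.List.pyGet? pvAlphabet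
              ((PySem.List.pyGetD eMessage i 0) - 1 -
               (PySem.Int.ofChars? [PySem.List.pyGetD key' i ' ']).getD 0)).getD ' '])
    ([] : List Char)
  String.ofList a

-- ===== PORT B =====
-- the Python string literal 'abcdefghijklmnopqrstuvwxyz' (string indexing ported over its chars, exact)
def pvLetters : List Char := "abcdefghijklmnopqrstuvwxyz".toList

-- Nat.toDigitsCore never shortens its accumulator (needed below to know str(key) ≠ '')
theorem pvToDigitsCore_len (b : Nat) :
    ∀ (f n : Nat) (ds : List Char), ds.length ≤ (Nat.toDigitsCore b f n ds).length := by
  intro f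
  induction f with
  | zero => intro n ds; simp [Nat.toDigitsCore]
  | succ f ih =>
    intro n ds
    simp only [Nat.toDigitsCore]
    split
    · simp
    · exact le_trans (by simp) (ih _ (Nat.digitChar (n % b) :: ds))

-- str(key) is never the empty string (the B port cites this for termination)
theorem pvToChars_ne_nil (key : Int) : PySem.Int.toChars key ≠ [] := by
  have hcore : ∀ n : Nat, Nat.toDigits 10 n ≠ [] := by
    intro n
    unfold Nat.toDigits
    simp only [Nat.toDigitsCore]
    split
    · simp
    · intro hnil
      have := pvToDigitsCore_len 10 n (n / 10) [Nat.digitChar (n % 10)]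
      rw [hnil] at this
      simp at this
  unfold PySem.Int.toChars
  split
  · simp
  · exact hcore _

-- literal port of B's while loop: each round decodes zip(rest, k) and continues with rest[len(k):]
-- (the slice index len(k) is a nonnegative literal, so rest[len(k):] is exactly List.drop).
def pvGo (ks : List Char) (hk : ks ≠ []) (rest : List Int) : List Char :=
  if h : rest = [] then []
  else
    ((rest.zip ks).map (fun p =>
        (PySem.List.pyGet? pvLetters (p.1 - 1 - (PySem.Int.ofChars? [p.2]).getD 0)).getD ' '))
      ++ pvGo ks hk (rest.drop ks.length)
termination_by rest.length
decreasing_by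
  have h1 : 0 < ks.length := List.length_pos_iff.mpr hk
  have h2 : 0 < rest.length := List.length_pos_iff.mpr h
  simp only [List.length_drop]
  omega

def digital_decipher_alt (eMessage : List Int) (key : Int) : String :=
  String.ofList (pvGo (PySem.Int.toChars key) (pvToChars_ne_nil key) eMessage)

-- ===== PRECONDITION & SPEC =====
-- the i-th digit of the cyclically repeated key, as Python's int() reads it
def pvKeyDigit (key : Int) (i : Nat) : Int :=
  let ks := PySem.Int.toChars key
  (PySem.Int.ofChars? [ks.getD (i % ks.length) ' ']).getD 0

-- Pre_ excludes exactly the inputs where Python A raises: a negative key with a nonempty message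
-- (int('-') is a ValueError), and any position whose letter index leaves [-26, 25] (IndexError).
def Pre_digital_decipher (eMessage : List Int) (key : Int) : Prop :=
  (eMessage = [] ∨ 0 ≤ key) ∧
  ∀ i < eMessage.length,
    -26 ≤ eMessage.getD i 0 - 1 - pvKeyDigit key i ∧ eMessage.getD i 0 - 1 - pvKeyDigit key i ≤ 25
instance (eMessage : List Int) (key : Int) : Decidable (Pre_digital_decipher eMessage key) := by
  unfold Pre_digital_decipher; infer_instance

def pvWitness_digital_decipher : List Int × Int := ([2, 5, 10], 14)

def Spec_digital_decipher (eMessage : List Int) (key : Int) (out : String) : Prop := out = digital_decipher_alt eMessage key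
instance (eMessage : List Int) (key : Int) (out : String) : Decidable (Spec_digital_decipher eMessage key out) := by unfold Spec_digital_decipher; infer_instance

-- ===== CLAIM (what is proved, stated in full; the proofs are below) =====
def Claim_equal_digital_decipher : Prop := ∀ (eMessage : List Int) (key : Int), Dom_digital_decipher eMessage key → Pre_digital_decipher eMessage key → Spec_digital_decipher eMessage key (digital_decipher eMessage key)

-- ===== LEMMAS AND PROOFS =====

-- the two letter tables are the same 26 characters
theorem pvLetters_eq : pvLetters = pvAlphabet := by decide

-- the repeated-key buffer agrees with cyclic indexing
theorem pvCyc_getD {α : Type} (cs : List α) (d : α) :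
    ∀ (m j y : Nat), y ≤ cs.length → j < m * cs.length + y →
      ((List.replicate m cs).flatten ++ cs.take y).getD j d = cs.getD (j % cs.length) d := by
  intro m
  induction m with
  | zero =>
    intro j y hy hj
    simp only [Nat.zero_mul, Nat.zero_add] at hj
    have hjL : j < cs.length := lt_of_lt_of_le hj hy
    rw [Nat.mod_eq_of_lt hjL]
    simp [List.getD, hj]
  | succ m ih =>
    intro j y hy hj
    have hsm : (m + 1) * cs.length = m * cs.length + cs.length := Nat.succ_mul _ _
    rw [List.replicate_succ, List.flatten_cons, List.append_assoc]
    by_cases hjL : j < cs.length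
    · rw [Nat.mod_eq_of_lt hjL]
      simp [List.getD, List.getElem?_append, hjL]
    · rw [Nat.not_lt] at hjL
      have h1 : ((cs ++ ((List.replicate m cs).flatten ++ cs.take y)).getD j d)
          = (((List.replicate m cs).flatten ++ cs.take y).getD (j - cs.length) d) := by
        simp [List.getD, List.getElem?_append_right hjL]
      rw [h1, ih (j - cs.length) y hy (by omega)]
      congr 1
      rw [← Nat.add_mod_right (j - cs.length) cs.length, Nat.sub_add_cancel hjL]

-- the element A appends at position j, written with cyclic key indexing
theorem pvElemA_eq (eMessage : List Int) (key : Int) (j : Nat) (hj : j < eMessage.length) :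
    (PySem.List.pyGet? pvAlphabet
        ((PySem.List.pyGetD eMessage (0 + (j : Int)) 0) - 1 -
         (PySem.Int.ofChars? [PySem.List.pyGetD
            ((List.replicate (PySem.Int.truncdiv (eMessage.length : Int) ((PySem.Int.toChars key).length : Int)).toNat (PySem.Int.toChars key)).flatten ++
              PySem.List.slice (PySem.Int.toChars key) (some 0)
                (some (PySem.Int.mod (eMessage.length : Int) ((PySem.Int.toChars key).length : Int))))
            (0 + (j : Int)) ' ']).getD 0)).getD ' '
    = (PySem.List.pyGet? pvAlphabet
        ((eMessage.getD j 0) - 1 -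
         (PySem.Int.ofChars? [(PySem.Int.toChars key).getD (j % (PySem.Int.toChars key).length) ' ']).getD 0)).getD ' ' := by
  set ks := PySem.Int.toChars key with hks
  have hL : 0 < ks.length := List.length_pos_iff.mpr (pvToChars_ne_nil key)
  have htr : (PySem.Int.truncdiv (eMessage.length : Int) (ks.length : Int)).toNat
      = eMessage.length / ks.length := by
    unfold PySem.Int.truncdiv
    have h : ((eMessage.length : Int)).tdiv (ks.length : Int)
        = ((eMessage.length / ks.length : Nat) : Int) := by
      rw [Int.tdiv_eq_ediv_of_nonneg (by positivity)]
      exact_mod_cast rfl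
    rw [h, Int.toNat_natCast]
  have hmod : PySem.Int.mod (eMessage.length : Int) (ks.length : Int)
      = ((eMessage.length % ks.length : Nat) : Int) := PySem.Int.mod_natCast _ _
  have hslice : PySem.List.slice ks (some 0) (some (PySem.Int.mod (eMessage.length : Int) (ks.length : Int)))
      = ks.take (eMessage.length % ks.length) := by
    rw [hmod, PySem.List.slice_toNat ks (by omega) (by positivity)]
    simp only [Int.toNat_natCast, Int.toNat_zero, Nat.sub_zero, List.drop_zero]
  rw [hslice, htr]
  have hz : (0 : Int) + (j : Int) = ((j : Nat) : Int) := by omega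
  rw [hz, PySem.List.pyGetD_natCast, PySem.List.pyGetD_natCast]
  have hdm : eMessage.length / ks.length * ks.length + eMessage.length % ks.length = eMessage.length := Nat.div_add_mod' _ _
  rw [pvCyc_getD ks ' ' (eMessage.length / ks.length) j (eMessage.length % ks.length)
        (Nat.le_of_lt (Nat.mod_lt _ hL)) (by omega)]

-- pvGo produces one letter per message element
theorem pvGo_length (ks : List Char) (hk : ks ≠ []) :
    ∀ (n : Nat) (rest : List Int), rest.length ≤ n → (pvGo ks hk rest).length = rest.length := by
  intro n
  induction n with
  | zero =>
    intro rest h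
    have : rest = [] := List.eq_nil_of_length_eq_zero (by omega)
    subst this; rw [pvGo]; simp
  | succ n ih =>
    intro rest h
    rw [pvGo]
    by_cases hr : rest = []
    · simp [hr]
    · rw [dif_neg hr]
      have hL : 0 < ks.length := List.length_pos_iff.mpr hk
      have hR : 0 < rest.length := List.length_pos_iff.mpr hr
      have := ih (rest.drop ks.length) (by simp [List.length_drop]; omega)
      simp [List.length_zip, this, List.length_drop]
      omega

-- the letter pvGo places at global position j uses the key digit at j % len(key)
theorem pvGo_getD (ks : List Char) (hk : ks ≠ []) :
    ∀ (n : Nat) (rest : List Int), rest.length ≤ n → ∀ j, j < rest.length →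
      (pvGo ks hk rest).getD j ' ' =
        (PySem.List.pyGet? pvLetters
          ((rest.getD j 0) - 1 - (PySem.Int.ofChars? [ks.getD (j % ks.length) ' ']).getD 0)).getD ' ' := by
  intro n
  induction n with
  | zero => intro rest h j hj; omega
  | succ n ih =>
    intro rest h j hj
    have hL : 0 < ks.length := List.length_pos_iff.mpr hk
    have hr : rest ≠ [] := by intro e; subst e; simp at hj
    rw [pvGo, dif_neg hr]
    by_cases hjL : j < ks.length
    · have hjz : j < ((rest.zip ks).map (fun p =>
          (PySem.List.pyGet? pvLetters (p.1 - 1 - (PySem.Int.ofChars? [p.2]).getD 0)).getD ' ')).length := by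
        simp [List.length_zip]; omega
      rw [List.getD_append _ _ _ _ hjz]
      have hjz' : j < (rest.zip ks).length := by simp [List.length_zip]; omega
      rw [List.getD_eq_getElem _ _ hjz, List.getElem_map, List.getElem_zip]
      rw [Nat.mod_eq_of_lt hjL]
      rw [List.getD_eq_getElem rest 0 hj, List.getD_eq_getElem ks ' ' hjL]
    · rw [Nat.not_lt] at hjL
      have hlen : ((rest.zip ks).map (fun p =>
          (PySem.List.pyGet? pvLetters (p.1 - 1 - (PySem.Int.ofChars? [p.2]).getD 0)).getD ' ')).length
          = ks.length := by
        simp [List.length_zip]; omega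
      rw [List.getD_append_right _ _ _ _ (by omega), hlen]
      have hdrop : (rest.drop ks.length).length ≤ n := by
        have hR : 0 < rest.length := List.length_pos_iff.mpr hr
        simp [List.length_drop]; omega
      rw [ih (rest.drop ks.length) hdrop (j - ks.length) (by simp [List.length_drop]; omega)]
      have hd : (rest.drop ks.length).getD (j - ks.length) 0 = rest.getD j 0 := by
        rw [List.getD_eq_getElem _ _ (by simp [List.length_drop]; omega),
            List.getElem_drop, List.getD_eq_getElem rest 0 (by omega)]
        congr 1; omega
      rw [hd, ← Nat.mod_eq_sub_mod hjL]

-- ===== VERDICT (by name: the statement is the Claim_ definition above) =====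
theorem digital_decipher_spec : Claim_equal_digital_decipher := by
  intro eMessage key _ _
  unfold Spec_digital_decipher
  simp only [digital_decipher, digital_decipher_alt]
  congr 1
  rw [PySem.List.foldl_append_singleton_eq_map, List.nil_append]
  apply List.ext_getElem
  · rw [pvGo_length _ _ eMessage.length eMessage le_rfl]
    simp [PySem.List.length_pyRange_one]
  · intro j h1 h2
    have hj : j < eMessage.length := by
      simp only [List.length_map, PySem.List.length_pyRange_one] at h1
      omega
    simp only [List.getElem_map]
    rw [PySem.List.getElem_pyRange_one 0 (eMessage.length : Int) j
          (by simpa [PySem.List.length_pyRange_one] using hj)]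
    rw [← List.getD_eq_getElem _ ' ' h2,
        pvGo_getD _ _ eMessage.length eMessage le_rfl j hj, pvLetters_eq]
    have h := pvElemA_eq eMessage key j hj
    simpa using h
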